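-- pv_equiv track=rewrite | github.com/brndngln/AIFOLIO_FINAL_V12 | autonomy/analytics.py | get_per_role_endpoint_breakdown
-- ===== SOURCE A (Python) =====
-- from typing import Dict, Any, List, Optional, Tuple, Callable, TypedDict, Union
--
-- class AuditEvent(TypedDict, total=False):
--     timestamp: Optional[str]
--     key: Optional[str]
--     action: Optional[str]
--     endpoint: Optional[str]
--     status: Optional[str]
--     latency: Optional[float]
--
-- def get_per_role_endpoint_breakdown(
--     events: List[AuditEvent], key_roles: Dict[str, str]
-- ) -> Dict[str, Dict[str, int]]:
--     result: Dict[str, Dict[str, int]] = {}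
--     for e in events:
--         role = key_roles.get(e.get("key", ""), "unknown")
--         ep = e.get("endpoint", None)
--         if role and ep:
--             if role not in result:
--                 result[role] = {}
--             result[role][ep] = result[role].get(ep, 0) + 1
--     return result
-- ===== SOURCE B (Python) =====
-- from typing import Dict, Any, List, Optional
--
-- def get_per_role_endpoint_breakdown(events, key_roles):
--     # Declarative two-phase rewrite: project events to a flat (role, endpoint)
--     # pair list, then build the nested result by dedup + count comprehensions.
--     pairs = []
--     for e in events:
--         role = key_roles.get(e.get("key", ""), "unknown")
--         ep = e.get("endpoint", None)
--         if role and ep: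
--             pairs.append((role, ep))
--     roles = list(dict.fromkeys(r for r, _ in pairs))
--     return {
--         r: {
--             ep: pairs.count((r, ep))
--             for ep in dict.fromkeys(p for q, p in pairs if q == r)
--         }
--         for r in roles
--     }
-- ===== Notes on version B (the rewrite author's own statement) =====
-- stated objective: alternative
-- what changed: Replaces A's single pass that incrementally grows a nested dict with a two-phase pipeline: first project events to a flat (role, endpoint) pair list, then build the nested result declaratively with ordered-dedup comprehensions and pairs.count.
import Mathlib
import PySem

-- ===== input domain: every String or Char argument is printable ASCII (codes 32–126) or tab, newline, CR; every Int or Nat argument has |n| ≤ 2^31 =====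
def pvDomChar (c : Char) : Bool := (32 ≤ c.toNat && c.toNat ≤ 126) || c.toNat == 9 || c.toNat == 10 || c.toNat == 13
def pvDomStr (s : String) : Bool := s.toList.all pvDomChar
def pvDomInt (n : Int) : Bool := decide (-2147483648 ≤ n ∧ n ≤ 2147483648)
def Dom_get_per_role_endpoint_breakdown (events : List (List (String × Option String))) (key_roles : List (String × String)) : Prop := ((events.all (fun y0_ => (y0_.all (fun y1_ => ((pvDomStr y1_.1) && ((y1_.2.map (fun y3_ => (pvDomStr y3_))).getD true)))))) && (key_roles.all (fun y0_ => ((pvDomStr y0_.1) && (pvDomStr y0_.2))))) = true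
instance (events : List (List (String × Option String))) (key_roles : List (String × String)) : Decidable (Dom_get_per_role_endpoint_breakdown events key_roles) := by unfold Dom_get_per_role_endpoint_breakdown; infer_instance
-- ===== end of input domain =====

-- B replaces A's single pass growing a nested dict with a two-phase pipeline
-- (flat (role, endpoint) projection, then dedup + count comprehensions); same
-- values, objective: alternative (not faster).

-- ===== PORT A =====
def get_per_role_endpoint_breakdown (events : List (List (String × Option String))) (key_roles : List (String × String)) : List (String × List (String × Int)) :=
  let result : PySem.Dict String (PySem.Dict String Int) :=
    events.foldl ((fun result e =>
      let role : String :=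
        match (PySem.Dict.mk e).get? "key" with
        | none => (PySem.Dict.mk key_roles).getD "" "unknown"
        | some none => "unknown"
        | some (some s) => (PySem.Dict.mk key_roles).getD s "unknown"
      let ep : Option String := ((PySem.Dict.mk e).get? "endpoint").getD none
      match ep with
      | some epv =>
        if role ≠ "" ∧ epv ≠ "" then
          let r1 := if result.contains role then result else result.insert role PySem.Dict.empty
          r1.insert role ((r1.getD role PySem.Dict.empty).insert epv
            ((r1.getD role PySem.Dict.empty).getD epv 0 + 1))
        else result
      | none => result) : PySem.Dict String (PySem.Dict String Int) → List (String × Option String) → PySem.Dict String (PySem.Dict String Int)) PySem.Dict.empty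
  result.items.map (fun p => (p.1, p.2.items))

-- ===== PORT B =====
def get_per_role_endpoint_breakdown_alt (events : List (List (String × Option String))) (key_roles : List (String × String)) : List (String × List (String × Int)) :=
  let pairs : List (String × String) :=
    events.foldl ((fun acc e =>
      let role : String :=
        match (PySem.Dict.mk e).get? "key" with
        | none => (PySem.Dict.mk key_roles).getD "" "unknown"
        | some none => "unknown"
        | some (some s) => (PySem.Dict.mk key_roles).getD s "unknown"
      match ((PySem.Dict.mk e).get? "endpoint").getD none with
      | some epv => if role ≠ "" ∧ epv ≠ "" then acc ++ [(role, epv)] else acc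
      | none => acc) : List (String × String) → List (String × Option String) → List (String × String)) []
  let roles : List String := PySem.List.dedup (pairs.map (fun p => p.1))
  roles.map (fun r => (r,
    (PySem.List.dedup ((pairs.filter (fun q => q.1 == r)).map (fun p => p.2))).map
      (fun ep => (ep, (pairs.count (r, ep) : Int)))))

-- ===== PRECONDITION & SPEC =====
def Spec_get_per_role_endpoint_breakdown (events : List (List (String × Option String))) (key_roles : List (String × String)) (out : List (String × List (String × Int))) : Prop := out = get_per_role_endpoint_breakdown_alt events key_roles
instance (events : List (List (String × Option String))) (key_roles : List (String × String)) (out : List (String × List (String × Int))) : Decidable (Spec_get_per_role_endpoint_breakdown events key_roles out) := by unfold Spec_get_per_role_endpoint_breakdown; infer_instance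

-- ===== CLAIM (what is proved, stated in full; the proofs are below) =====
def Claim_equal_get_per_role_endpoint_breakdown : Prop := ∀ (events : List (List (String × Option String))) (key_roles : List (String × String)), Dom_get_per_role_endpoint_breakdown events key_roles → Spec_get_per_role_endpoint_breakdown events key_roles (get_per_role_endpoint_breakdown events key_roles)

-- ===== LEMMAS AND PROOFS =====

-- the role an event maps to (both ports compute it inline)
def pvRole (key_roles : List (String × String)) (e : List (String × Option String)) : String :=
  match (PySem.Dict.mk e).get? "key" with
  | none => (PySem.Dict.mk key_roles).getD "" "unknown"
  | some none => "unknown"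
  | some (some s) => (PySem.Dict.mk key_roles).getD s "unknown"

-- the (role, endpoint) pair an event contributes, if any
def pvExtract (key_roles : List (String × String)) (e : List (String × Option String)) : Option (String × String) :=
  match ((PySem.Dict.mk e).get? "endpoint").getD none with
  | some epv => if pvRole key_roles e ≠ "" ∧ epv ≠ "" then some (pvRole key_roles e, epv) else none
  | none => none

-- A's loop body, as a step on one extracted pair
def pvStep (result : PySem.Dict String (PySem.Dict String Int)) (p : String × String) : PySem.Dict String (PySem.Dict String Int) :=
  if result.contains p.1 then
    result.insert p.1 ((result.getD p.1 PySem.Dict.empty).insert p.2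
      ((result.getD p.1 PySem.Dict.empty).getD p.2 0 + 1))
  else
    (result.insert p.1 PySem.Dict.empty).insert p.1
      (((result.insert p.1 PySem.Dict.empty).getD p.1 PySem.Dict.empty).insert p.2
        (((result.insert p.1 PySem.Dict.empty).getD p.1 PySem.Dict.empty).getD p.2 0 + 1))

def pvN (l : List (String × String)) : PySem.Dict String (PySem.Dict String Int) :=
  l.foldl pvStep PySem.Dict.empty

lemma pvAbody (key_roles : List (String × String)) :
    ((fun result e =>
      let role : String :=
        match (PySem.Dict.mk e).get? "key" with
        | none => (PySem.Dict.mk key_roles).getD "" "unknown"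
        | some none => "unknown"
        | some (some s) => (PySem.Dict.mk key_roles).getD s "unknown"
      let ep : Option String := ((PySem.Dict.mk e).get? "endpoint").getD none
      match ep with
      | some epv =>
        if role ≠ "" ∧ epv ≠ "" then
          let r1 := if result.contains role then result else result.insert role PySem.Dict.empty
          r1.insert role ((r1.getD role PySem.Dict.empty).insert epv
            ((r1.getD role PySem.Dict.empty).getD epv 0 + 1))
        else result
      | none => result) : PySem.Dict String (PySem.Dict String Int) → List (String × Option String) → PySem.Dict String (PySem.Dict String Int))
    = fun result e => (pvExtract key_roles e).elim result (fun p => pvStep result p) := by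
  funext result e
  simp only [pvExtract, pvRole]
  cases h : ((PySem.Dict.mk e).get? "endpoint").getD none with
  | none => rfl
  | some epv =>
    generalize (match (PySem.Dict.mk e).get? "key" with
      | none => (PySem.Dict.mk key_roles).getD "" "unknown"
      | some none => "unknown"
      | some (some s) => (PySem.Dict.mk key_roles).getD s "unknown") = roleE
    by_cases hio : roleE ≠ "" ∧ epv ≠ ""
    · simp only [if_pos hio]
      simp [pvStep]
      split_ifs with hcont <;> simp [PySem.Dict.getD_insert_self, PySem.Dict.getD_empty]
    · simp [hio]

lemma pvBbody (key_roles : List (String × String)) :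
    ((fun acc e =>
      let role : String :=
        match (PySem.Dict.mk e).get? "key" with
        | none => (PySem.Dict.mk key_roles).getD "" "unknown"
        | some none => "unknown"
        | some (some s) => (PySem.Dict.mk key_roles).getD s "unknown"
      match ((PySem.Dict.mk e).get? "endpoint").getD none with
      | some epv => if role ≠ "" ∧ epv ≠ "" then acc ++ [(role, epv)] else acc
      | none => acc) : List (String × String) → List (String × Option String) → List (String × String))
    = fun acc e => (pvExtract key_roles e).elim acc (fun p => acc ++ [p]) := by
  funext acc e
  simp only [pvExtract, pvRole]
  cases h : ((PySem.Dict.mk e).get? "endpoint").getD none with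
  | none => rfl
  | some epv =>
    generalize (match (PySem.Dict.mk e).get? "key" with
      | none => (PySem.Dict.mk key_roles).getD "" "unknown"
      | some none => "unknown"
      | some (some s) => (PySem.Dict.mk key_roles).getD s "unknown") = roleE
    by_cases hio : roleE ≠ "" ∧ epv ≠ ""
    · simp [hio]
    · simp [hio]

lemma pvAfoldFM (key_roles : List (String × String)) (events : List (List (String × Option String))) (acc : PySem.Dict String (PySem.Dict String Int)) :
    events.foldl (fun result e => (pvExtract key_roles e).elim result (fun p => pvStep result p)) acc
      = (events.filterMap (pvExtract key_roles)).foldl pvStep acc := by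
  induction events generalizing acc with
  | nil => rfl
  | cons e es ih =>
    simp only [List.foldl_cons, List.filterMap_cons]
    cases pvExtract key_roles e <;> simp [ih]

lemma pvBfoldFM (key_roles : List (String × String)) (events : List (List (String × Option String))) (acc : List (String × String)) :
    events.foldl (fun a e => (pvExtract key_roles e).elim a (fun p => a ++ [p])) acc
      = acc ++ events.filterMap (pvExtract key_roles) := by
  induction events generalizing acc with
  | nil => simp
  | cons e es ih =>
    simp only [List.foldl_cons, List.filterMap_cons]
    cases pvExtract key_roles e <;> simp [ih]

lemma pvStep_getD_fst (r : PySem.Dict String (PySem.Dict String Int)) (p : String × String) :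
    (pvStep r p).getD p.1 PySem.Dict.empty
      = (r.getD p.1 PySem.Dict.empty).insert p.2 ((r.getD p.1 PySem.Dict.empty).getD p.2 0 + 1) := by
  unfold pvStep
  split_ifs with h
  · rw [PySem.Dict.getD_insert_self]
  · have h' : r.contains p.1 = false := by simpa using h
    rw [PySem.Dict.getD_insert_self, PySem.Dict.getD_insert_self,
      PySem.Dict.getD_of_not_contains r _ h']

lemma pvStep_getD_ne (r : PySem.Dict String (PySem.Dict String Int)) (p : String × String) (x : String) (hx : x ≠ p.1) :
    (pvStep r p).getD x PySem.Dict.empty = r.getD x PySem.Dict.empty := by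
  unfold pvStep
  split_ifs with h
  · rw [PySem.Dict.getD_insert_of_ne _ _ _ hx]
  · rw [PySem.Dict.getD_insert_of_ne _ _ _ hx, PySem.Dict.getD_insert_of_ne _ _ _ hx]

lemma pvStep_keys (r : PySem.Dict String (PySem.Dict String Int)) (p : String × String) :
    (pvStep r p).keys = PySem.Set.add r.keys p.1 := by
  unfold pvStep
  by_cases h : r.contains p.1 = true
  · rw [if_pos h, PySem.Dict.keys_insert_of_contains _ _ h]
    have hmem : p.1 ∈ r.keys := (PySem.Dict.contains_iff_mem_keys r p.1).mp h
    simp [PySem.Set.add, hmem]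
  · have h' : r.contains p.1 = false := by simpa using h
    have hmem : p.1 ∉ r.keys := fun hm => h ((PySem.Dict.contains_iff_mem_keys r p.1).mpr hm)
    rw [if_neg h, PySem.Dict.keys_insert_of_contains _ _ (PySem.Dict.contains_insert_self r p.1 _),
      PySem.Dict.keys_insert_of_not_contains _ _ h']
    simp [PySem.Set.add, hmem]

lemma pvSet_ofList_append_singleton {α : Type} [BEq α] (xs : List α) (x : α) :
    PySem.Set.ofList (xs ++ [x]) = PySem.Set.add (PySem.Set.ofList xs) x := by
  simp [PySem.Set.ofList, List.foldl_append]

lemma pvN_keys (l : List (String × String)) :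
    (pvN l).keys = PySem.Set.ofList (l.map (fun p => p.1)) := by
  induction l using List.reverseRecOn with
  | nil => rfl
  | append_singleton xs x ih =>
    rw [pvN, List.foldl_append, ← pvN, List.foldl_cons, List.foldl_nil,
      pvStep_keys, ih, List.map_append]
    simp only [List.map_cons, List.map_nil]
    rw [pvSet_ofList_append_singleton]

lemma pvN_getD (l : List (String × String)) (r : String) :
    ((pvN l).getD r PySem.Dict.empty).items
      = (PySem.Set.ofList ((l.filter (fun q => q.1 == r)).map (fun p => p.2))).map
          (fun e => (e, (l.count (r, e) : Int))) := by
  induction l using List.reverseRecOn generalizing r with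
  | nil =>
    simp only [pvN, List.foldl_nil, PySem.Dict.getD_empty]
    rfl
  | append_singleton xs p ih =>
    have hfold : pvN (xs ++ [p]) = pvStep (pvN xs) p := by
      rw [pvN, List.foldl_append, ← pvN, List.foldl_cons, List.foldl_nil]
    by_cases hr : r = p.1
    · subst hr
      rw [hfold, pvStep_getD_fst]
      have hI := ih p.1
      set E : List String := PySem.Set.ofList ((xs.filter (fun q => q.1 == p.1)).map (fun q => q.2)) with hE
      have hkeys : ((pvN xs).getD p.1 PySem.Dict.empty).keys = E := by
        simp only [PySem.Dict.keys, hI, List.map_map]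
        simp [Function.comp_def]
      have hnd : ((pvN xs).getD p.1 PySem.Dict.empty).keys.Nodup := by
        rw [hkeys]; exact PySem.Set.nodup_ofList _
      have hfilt : ((xs ++ [p]).filter (fun q => q.1 == p.1)).map (fun q => q.2)
          = (xs.filter (fun q => q.1 == p.1)).map (fun q => q.2) ++ [p.2] := by
        simp [List.filter_append]
      have hmemE : ∀ y : String, y ∈ E ↔ y ∈ (xs.filter (fun q => q.1 == p.1)).map (fun q => q.2) := by
        intro y; rw [hE]; exact PySem.Set.mem_ofList _ y
      have hcount0 : p.2 ∉ E → xs.count (p.1, p.2) = 0 := by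
        intro hnb
        rw [List.count_eq_zero]
        intro hmem
        exact hnb ((hmemE p.2).mpr (List.mem_map_of_mem (by simp [List.mem_filter, hmem])))
      rw [hfilt, pvSet_ofList_append_singleton, ← hE]
      by_cases hc : ((pvN xs).getD p.1 PySem.Dict.empty).contains p.2 = true
      · -- endpoint already present: in-place replace
        have hbE : p.2 ∈ E := by
          rw [← hkeys]; exact (PySem.Dict.contains_iff_mem_keys _ _).mp hc
        have hval : ((pvN xs).getD p.1 PySem.Dict.empty).getD p.2 0 = (xs.count (p.1, p.2) : Int) := by
          refine PySem.Dict.getD_of_mem_items _ ?_ hnd 0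
          rw [hI]
          exact List.mem_map_of_mem hbE
        have haddE : PySem.Set.add E p.2 = E := by
          simp [PySem.Set.add, hbE]
        rw [PySem.Dict.items_insert_of_contains _ _ hc, haddE, hI, List.map_map]
        apply List.map_congr_left
        intro e heE
        by_cases heb : e = p.2
        · simp [Function.comp, heb, hval]
        · have hne : ((e : String) == p.2) = false := by simpa using heb
          have hcnt : (xs ++ [p]).count (p.1, e) = xs.count (p.1, e) := by
            rw [List.count_append]
            have hp : (p == (p.1, e)) = false := by
              simp only [beq_eq_false_iff_ne]
              intro hpe
              exact heb (congrArg Prod.snd hpe).symm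
            simp [List.count_singleton, hp]
          simp [Function.comp, hne, hcnt]
      · -- new endpoint: append
        have hc' : ((pvN xs).getD p.1 PySem.Dict.empty).contains p.2 = false := by
          simpa using hc
        have hbE : p.2 ∉ E := by
          rw [← hkeys]
          intro hm; exact hc ((PySem.Dict.contains_iff_mem_keys _ _).mpr hm)
        have hval : ((pvN xs).getD p.1 PySem.Dict.empty).getD p.2 0 = 0 :=
          PySem.Dict.getD_of_not_contains _ _ hc'
        have haddE : PySem.Set.add E p.2 = E ++ [p.2] := by
          simp [PySem.Set.add, hbE]
        rw [PySem.Dict.items_insert_of_not_contains _ _ hc', haddE, hI, hval, List.map_append]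
        congr 1
        · apply List.map_congr_left
          intro e heE
          have heb : e ≠ p.2 := fun h => hbE (h ▸ heE)
          have : (xs ++ [p]).count (p.1, e) = xs.count (p.1, e) := by
            rw [List.count_append]
            have : (p == (p.1, e)) = false := by
              simp only [beq_eq_false_iff_ne]
              intro hpe
              exact heb (congrArg Prod.snd hpe).symm
            simp [List.count_singleton, this]
          rw [this]
        · simp
          exact hcount0 hbE
    · rw [hfold, pvStep_getD_ne _ _ _ hr, ih]
      have hp1 : (p.1 == r) = false := by
        simp only [beq_eq_false_iff_ne]
        intro h; exact hr h.symm
      have hfilter : (xs ++ [p]).filter (fun q => q.1 == r) = xs.filter (fun q => q.1 == r) := by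
        simp [List.filter_append, hp1]
      rw [hfilter]
      apply List.map_congr_left
      intro e _
      have : (p == (r, e)) = false := by
        simp only [beq_eq_false_iff_ne]
        intro h; exact hr (congrArg Prod.fst h).symm
      simp [List.count_append, List.count_singleton, this]

lemma pvMain (l : List (String × String)) :
    (pvN l).items.map (fun p => (p.1, p.2.items))
      = (PySem.List.dedup (l.map (fun p => p.1))).map (fun r => (r,
          (PySem.List.dedup ((l.filter (fun q => q.1 == r)).map (fun p => p.2))).map
            (fun ep => (ep, (l.count (r, ep) : Int))))) := by
  have hnd : (pvN l).keys.Nodup := by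
    rw [pvN_keys]; exact PySem.Set.nodup_ofList _
  rw [PySem.Dict.items_eq_map_keys _ hnd PySem.Dict.empty, List.map_map, pvN_keys]
  simp only [PySem.List.dedup]
  apply List.map_congr_left
  intro r _
  simp only [Function.comp]
  rw [pvN_getD]

-- ===== VERDICT (by name: the statement is the Claim_ definition above) =====
theorem get_per_role_endpoint_breakdown_spec : Claim_equal_get_per_role_endpoint_breakdown := by
  intro events key_roles _
  unfold Spec_get_per_role_endpoint_breakdown
  simp only [get_per_role_endpoint_breakdown, get_per_role_endpoint_breakdown_alt]
  rw [pvAbody key_roles, pvBbody key_roles, pvAfoldFM, pvBfoldFM, List.nil_append]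
  have h := pvMain (events.filterMap (pvExtract key_roles))
  unfold pvN at h
  exact h
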